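-- pv_equiv track=rewrite | github.com/Jobeer1/Ubuntu-Patient-Care | 4-PACS-Module/Orthanc/medical-reporting-module/core/medical_stt_enhancer.py | _get_context_corrections
-- ===== SOURCE A (Python) =====
-- def _get_context_corrections(medical_context):
--     """Get context-aware corrections based on medical context"""
--     corrections = {}
--
--     # If cardiovascular terms are in context
--     if any('heart' in term.lower() or 'cardiac' in term.lower() for term in medical_context):
--         corrections.update({
--             r'\bmi\b': 'myocardial infarction',
--             r'\baf\b': 'atrial fibrillation',
--             r'\bvt\b': 'ventricular tachycardia'
--         })
--
--     # If respiratory terms are in context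
--     if any('lung' in term.lower() or 'respiratory' in term.lower() for term in medical_context):
--         corrections.update({
--             r'\bcopd\b': 'chronic obstructive pulmonary disease',
--             r'\basthma\b': 'asthma',
--             r'\bpe\b': 'pulmonary embolism'
--         })
--
--     # If infectious disease terms are in context
--     if any('infection' in term.lower() or 'fever' in term.lower() for term in medical_context):
--         corrections.update({
--             r'\bhiv\b': 'HIV',
--             r'\btb\b': 'tuberculosis',
--             r'\buti\b': 'urinary tract infection'
--         })
--
--     return corrections
-- ===== SOURCE B (Python) =====
-- def _get_context_corrections(medical_context):
--     """One pass over medical_context sets three flags; corrections built once at the end."""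
--     cardio = resp = infect = False
--     for term in medical_context:
--         t = term.lower()
--         if 'heart' in t or 'cardiac' in t:
--             cardio = True
--         if 'lung' in t or 'respiratory' in t:
--             resp = True
--         if 'infection' in t or 'fever' in t:
--             infect = True
--     out = {}
--     if cardio:
--         out[r'\bmi\b'] = 'myocardial infarction'
--         out[r'\baf\b'] = 'atrial fibrillation'
--         out[r'\bvt\b'] = 'ventricular tachycardia'
--     if resp:
--         out[r'\bcopd\b'] = 'chronic obstructive pulmonary disease'
--         out[r'\basthma\b'] = 'asthma'
--         out[r'\bpe\b'] = 'pulmonary embolism'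
--     if infect:
--         out[r'\bhiv\b'] = 'HIV'
--         out[r'\btb\b'] = 'tuberculosis'
--         out[r'\buti\b'] = 'urinary tract infection'
--     return out
-- ===== Notes on version B (the rewrite author's own statement) =====
-- stated objective: faster
-- what changed: B lowercases each term once in a single traversal that sets three context flags, instead of A's three separate any() scans each re-lowercasing every term; the corrections are then assembled from the flags.
import Mathlib
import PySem

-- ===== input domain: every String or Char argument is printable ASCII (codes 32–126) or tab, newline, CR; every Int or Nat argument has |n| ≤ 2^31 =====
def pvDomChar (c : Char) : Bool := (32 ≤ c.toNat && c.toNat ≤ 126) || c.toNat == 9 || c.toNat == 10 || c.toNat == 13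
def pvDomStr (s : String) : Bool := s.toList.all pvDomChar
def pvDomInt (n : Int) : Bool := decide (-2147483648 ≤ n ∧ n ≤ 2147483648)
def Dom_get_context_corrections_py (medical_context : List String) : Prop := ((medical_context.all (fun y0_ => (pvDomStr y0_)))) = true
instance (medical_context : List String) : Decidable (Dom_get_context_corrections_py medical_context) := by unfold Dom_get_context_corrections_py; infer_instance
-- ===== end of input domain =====

-- B replaces A's three any() scans (each lowercasing every term again) by ONE pass that
-- lowercases each term once and sets three flags, then assembles the same corrections.

-- ===== PORT A =====
def get_context_corrections_py (medical_context : List String) : List (String × String) :=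
  let corrections : PySem.Dict String String := PySem.Dict.empty
  let corrections :=
    if medical_context.any (fun term =>
        PySem.Str.isIn "heart" (PySem.Str.lower term) || PySem.Str.isIn "cardiac" (PySem.Str.lower term)) then
      corrections.update [("\\bmi\\b", "myocardial infarction"),
                          ("\\baf\\b", "atrial fibrillation"),
                          ("\\bvt\\b", "ventricular tachycardia")]
    else corrections
  let corrections :=
    if medical_context.any (fun term =>
        PySem.Str.isIn "lung" (PySem.Str.lower term) || PySem.Str.isIn "respiratory" (PySem.Str.lower term)) then
      corrections.update [("\\bcopd\\b", "chronic obstructive pulmonary disease"),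
                          ("\\basthma\\b", "asthma"),
                          ("\\bpe\\b", "pulmonary embolism")]
    else corrections
  let corrections :=
    if medical_context.any (fun term =>
        PySem.Str.isIn "infection" (PySem.Str.lower term) || PySem.Str.isIn "fever" (PySem.Str.lower term)) then
      corrections.update [("\\bhiv\\b", "HIV"),
                          ("\\btb\\b", "tuberculosis"),
                          ("\\buti\\b", "urinary tract infection")]
    else corrections
  corrections.items

-- ===== PORT B =====
-- single fold setting the three flags (term lowered once per iteration)
def pvFlagsStep (acc : Bool × Bool × Bool) (term : String) : Bool × Bool × Bool :=
  let t := PySem.Str.lower term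
  ((acc.1 || (PySem.Str.isIn "heart" t || PySem.Str.isIn "cardiac" t)),
   (acc.2.1 || (PySem.Str.isIn "lung" t || PySem.Str.isIn "respiratory" t)),
   (acc.2.2 || (PySem.Str.isIn "infection" t || PySem.Str.isIn "fever" t)))

def get_context_corrections_py_alt (medical_context : List String) : List (String × String) :=
  let flags := medical_context.foldl pvFlagsStep (false, false, false)
  -- the out dict receives only fresh keys, so its items list is this concatenation
  (if flags.1 then [("\\bmi\\b", "myocardial infarction"),
                    ("\\baf\\b", "atrial fibrillation"),
                    ("\\bvt\\b", "ventricular tachycardia")] else []) ++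
  (if flags.2.1 then [("\\bcopd\\b", "chronic obstructive pulmonary disease"),
                      ("\\basthma\\b", "asthma"),
                      ("\\bpe\\b", "pulmonary embolism")] else []) ++
  (if flags.2.2 then [("\\bhiv\\b", "HIV"),
                      ("\\btb\\b", "tuberculosis"),
                      ("\\buti\\b", "urinary tract infection")] else [])

-- ===== PRECONDITION & SPEC =====
def Spec_get_context_corrections_py (medical_context : List String) (out : List (String × String)) : Prop := out = get_context_corrections_py_alt medical_context
instance (medical_context : List String) (out : List (String × String)) : Decidable (Spec_get_context_corrections_py medical_context out) := by unfold Spec_get_context_corrections_py; infer_instance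

-- ===== CLAIM (what is proved, stated in full; the proofs are below) =====
def Claim_equal_get_context_corrections_py : Prop := ∀ (medical_context : List String), Dom_get_context_corrections_py medical_context → Spec_get_context_corrections_py medical_context (get_context_corrections_py medical_context)

-- ===== LEMMAS AND PROOFS =====

-- the one-pass flag fold computes the three any-scans
theorem pvFlags_eq_any (l : List String) (a b c : Bool) :
    l.foldl pvFlagsStep (a, b, c) =
      (a || l.any (fun term => PySem.Str.isIn "heart" (PySem.Str.lower term) || PySem.Str.isIn "cardiac" (PySem.Str.lower term)),
       b || l.any (fun term => PySem.Str.isIn "lung" (PySem.Str.lower term) || PySem.Str.isIn "respiratory" (PySem.Str.lower term)),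
       c || l.any (fun term => PySem.Str.isIn "infection" (PySem.Str.lower term) || PySem.Str.isIn "fever" (PySem.Str.lower term))) := by
  induction l generalizing a b c with
  | nil => simp
  | cons x xs ih =>
      simp only [List.foldl_cons, List.any_cons, pvFlagsStep, ih]
      simp [Bool.or_assoc]

-- ===== VERDICT (by name: the statement is the Claim_ definition above) =====
theorem get_context_corrections_py_spec : Claim_equal_get_context_corrections_py := by
  intro mc _
  show get_context_corrections_py mc = get_context_corrections_py_alt mc
  unfold get_context_corrections_py get_context_corrections_py_alt
  rw [pvFlags_eq_any]
  rcases h1 : mc.any (fun term => PySem.Str.isIn "heart" (PySem.Str.lower term) || PySem.Str.isIn "cardiac" (PySem.Str.lower term)) <;>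
  rcases h2 : mc.any (fun term => PySem.Str.isIn "lung" (PySem.Str.lower term) || PySem.Str.isIn "respiratory" (PySem.Str.lower term)) <;>
  rcases h3 : mc.any (fun term => PySem.Str.isIn "infection" (PySem.Str.lower term) || PySem.Str.isIn "fever" (PySem.Str.lower term)) <;>
  simp <;> decide
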